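-- pv_equiv track=rewrite | github.com/c-mart/solitaire-pontifex | solitaire_pontifex.py | key_from_passphrase
-- ===== SOURCE A (Python) =====
-- import string
--
-- def reference_numeric_key():
--     """Returns ordered reference list of cards represented as numbers from 1-54 inclusive"""
--     return [x for x in range(1, 55)]
--
-- def letter_to_number(letter):
--     """Given a single letter, return its 1-indexed number in the alphabet."""
--     validate_letter_str(letter)
--     assert len(letter) == 1, "Must pass a single letter"
--     return string.ascii_uppercase.index(letter.upper()) + 1
--
-- def advance_joker_a(deck):
--     """Given a deck (numeric representation), locate joker A and advance it one position, return new deck"""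
--     # Locate joker A and advance it one position
--     ja_loc = deck.index(53)
--     if ja_loc == 53:  # If joker A is on the bottom of the deck, move it to one card below the top
--         return [deck[0]] + [53] + deck[1:53]
--     else:
--         return deck[:ja_loc] + [deck[ja_loc + 1]] + [53] + deck[ja_loc + 2:]
--
-- def advance_joker_b(deck):
--     """Given a deck (numeric representation), locate joker B and advance it two positions, return new deck"""
--     jb_loc = deck.index(54)
--     if jb_loc == 53:  # If joker B is on the bottom of the deck, move it to two positions below the top
--         return deck[0:2] + [54] + deck[2:53]
--     if jb_loc == 52:  # If joker is second from bottom of the deck, move it to one position below the top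
--         return [deck[0]] + [54] + deck[1:52] + [deck[53]]
--     else:
--         return deck[:jb_loc] + deck[jb_loc + 1:jb_loc + 3] + [54] + deck[jb_loc + 3:]
--
-- def triple_cut(deck):
--     """Given a deck, perform a triple cut, return new deck.
--     A triple cut swaps the cards before the first-appearing joker with the cards after the last-appearing joker.
--     The *relative* positions of the two jokers and cards between them do not change.
--     """
--     first_j_loc, second_j_loc = sorted([deck.index(53), deck.index(54)])
--     return deck[second_j_loc + 1:] + deck[first_j_loc:second_j_loc + 1] + deck[:first_j_loc]
--
-- def count_cut(deck):
--     """Given a deck, perform a count cut, return new deck. Count cut steps: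
--     1. Observe numeric value (n) of bottom card. Per specification, both jokers have value 53 (both treated as joker A)
--     2. Cut from after the nth (1-indexed) card up to (but not including) the last card
--     3. Move the cut section to the top of the deck
--     """
--     bottom_card_val = deck[53]
--     # Per specification, both jokers have value 53 in this step, so if we find Joker B we treat it as Joker A
--     if bottom_card_val == 54:
--         bottom_card_val = 53
--     # 'Cheat' by using the 1-indexed card value to refer to position following zero-indexed list location
--     return deck[bottom_card_val:53] + deck[:bottom_card_val] + [deck[53]]
--
-- def count_cut_from_letter(deck, letter):
--     """Given a deck, perform a count cut as defined above, with one modification: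
--     Use 1-indexed numeric value of letter rather than numeric value of bottom card.
--     Return new deck.
--     """
--     cut_pos = letter_to_number(letter)
--     # 'Cheat' by using the 1-indexed cut position to refer to position following zero-indexed list location
--     return deck[cut_pos:53] + deck[:cut_pos] + [deck[53]]
--
-- def key_from_passphrase(passphrase):
--     """Generate a key deck from a passphrase of entirely letters using keying method 3 in specification"""
--     validate_letter_str(passphrase)
--     key_deck = reference_numeric_key()
--     for letter in passphrase:
--         key_deck = advance_joker_a(key_deck)
--         key_deck = advance_joker_b(key_deck)
--         key_deck = triple_cut(key_deck)
--         key_deck = count_cut(key_deck)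
--         key_deck = count_cut_from_letter(key_deck, letter)
--     return key_deck
--
-- def validate_letter_str(letter_str):
--     """Confirms that a plaintext matches the specification accepted by the algorithm"""
--     assert type(letter_str) == str, "input must be a string"
--     assert all([letter in string.ascii_letters for letter in letter_str]), "input must consist entirely of letters"
-- ===== SOURCE B (Python) =====
-- import string
--
-- def key_from_passphrase(passphrase):
--     """Generate a key deck from a passphrase: unified modular joker moves and
--     fused count cuts (both count cuts are rotations of the top 53 cards)."""
--     assert type(passphrase) == str, "input must be a string"
--     assert all([c in string.ascii_letters for c in passphrase]), "input must consist entirely of letters"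
--     deck = list(range(1, 55))
--     for letter in passphrase:
--         # advance each joker by its shift; remove it and reinsert with wrap
--         # so that passing the bottom lands it just below the top
--         for joker, shift in ((53, 1), (54, 2)):
--             i = deck.index(joker)
--             deck.pop(i)
--             j = (i + shift - 1) % 53 + 1
--             deck.insert(j, joker)
--         # triple cut around the two jokers
--         a = min(deck.index(53), deck.index(54))
--         b = max(deck.index(53), deck.index(54))
--         deck = deck[b + 1:] + deck[a:b + 1] + deck[:a]
--         # both count cuts rotate the top 53 cards, bottom card fixed: fuse them
--         n = min(deck[-1], 53)
--         p = ord(letter.upper()) - 64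
--         r = (n + p) % 53
--         deck = deck[r:-1] + deck[:r] + deck[-1:]
--     return deck
-- ===== Notes on version B (the rewrite author's own statement) =====
-- stated objective: alternative
-- what changed: The two branch-heavy joker-advance functions become one remove/reinsert-at-((i+shift-1)%53+1) move with modular wraparound, and the two successive count cuts are fused into a single rotation of the top 53 cards by (min(bottom,53)+letter)%53 with the bottom card fixed; the deck is updated in place with pop/insert instead of rebuilt from five-way slicing.
import Mathlib
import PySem

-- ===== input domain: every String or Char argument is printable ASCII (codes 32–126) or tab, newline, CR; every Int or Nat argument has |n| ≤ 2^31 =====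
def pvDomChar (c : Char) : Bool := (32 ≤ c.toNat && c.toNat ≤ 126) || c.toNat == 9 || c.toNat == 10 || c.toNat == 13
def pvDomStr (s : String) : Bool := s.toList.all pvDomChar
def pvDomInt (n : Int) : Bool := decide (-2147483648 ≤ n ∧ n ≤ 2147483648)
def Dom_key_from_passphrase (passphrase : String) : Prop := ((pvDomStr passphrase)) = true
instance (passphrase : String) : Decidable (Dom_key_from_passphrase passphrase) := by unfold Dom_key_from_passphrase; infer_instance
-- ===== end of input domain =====

-- B replaces A's branch-heavy joker slicing by one remove/reinsert-at-((i+shift-1)%53+1) move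
-- and fuses the two count cuts into a single rotation of the top 53 cards (objective: alternative).

-- ===== PORT A =====
-- reference_numeric_key()
def pvRefKey : List Int := PySem.List.pyRange 1 55 1

def pvAsciiUppercase : List Char := ['A','B','C','D','E','F','G','H','I','J','K','L','M','N','O','P','Q','R','S','T','U','V','W','X','Y','Z']

-- letter_to_number (single char); ValueError branch unreachable under Pre_ (letters only)
def pvLetterToNumber (letter : Char) : Int :=
  match PySem.List.index? pvAsciiUppercase (PySem.Chars.upperChar letter) with
  | some k => (k : Int) + 1
  | none => 0

-- advance_joker_a; deck.index(53) raising (joker absent) is unreachable: the deck always holds both jokers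
def pvAdvanceJokerA (deck : List Int) : List Int :=
  match PySem.List.index? deck 53 with
  | none => []
  | some ja =>
    if ja = 53 then
      [PySem.List.pyGetD deck 0 0] ++ [53] ++ PySem.List.slice deck (some 1) (some 53)
    else
      PySem.List.slice deck none (some (ja : Int)) ++ [PySem.List.pyGetD deck ((ja : Int) + 1) 0]
        ++ [53] ++ PySem.List.slice deck (some ((ja : Int) + 2)) none

-- advance_joker_b
def pvAdvanceJokerB (deck : List Int) : List Int :=
  match PySem.List.index? deck 54 with
  | none => []
  | some jb =>
    if jb = 53 then
      PySem.List.slice deck (some 0) (some 2) ++ [54] ++ PySem.List.slice deck (some 2) (some 53)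
    else if jb = 52 then
      [PySem.List.pyGetD deck 0 0] ++ [54] ++ PySem.List.slice deck (some 1) (some 52)
        ++ [PySem.List.pyGetD deck 53 0]
    else
      PySem.List.slice deck none (some (jb : Int))
        ++ PySem.List.slice deck (some ((jb : Int) + 1)) (some ((jb : Int) + 3))
        ++ [54] ++ PySem.List.slice deck (some ((jb : Int) + 3)) none

-- triple_cut
def pvTripleCut (deck : List Int) : List Int :=
  let s := PySem.List.sorted [((PySem.List.index? deck 53).getD 0 : Int),
                             ((PySem.List.index? deck 54).getD 0 : Int)] (fun x => x) false
  let first := PySem.List.pyGetD s 0 0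
  let second := PySem.List.pyGetD s 1 0
  PySem.List.slice deck (some (second + 1)) none
    ++ PySem.List.slice deck (some first) (some (second + 1))
    ++ PySem.List.slice deck none (some first)

-- count_cut
def pvCountCut (deck : List Int) : List Int :=
  let bv0 := PySem.List.pyGetD deck 53 0
  let bv := if bv0 = 54 then (53 : Int) else bv0
  PySem.List.slice deck (some bv) (some 53) ++ PySem.List.slice deck none (some bv)
    ++ [PySem.List.pyGetD deck 53 0]

-- count_cut_from_letter
def pvCountCutFromLetter (deck : List Int) (letter : Char) : List Int :=
  let cut := pvLetterToNumber letter
  PySem.List.slice deck (some cut) (some 53) ++ PySem.List.slice deck none (some cut)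
    ++ [PySem.List.pyGetD deck 53 0]

def key_from_passphrase (passphrase : String) : List Int :=
  passphrase.toList.foldl
    (fun kd letter =>
      pvCountCutFromLetter (pvCountCut (pvTripleCut (pvAdvanceJokerB (pvAdvanceJokerA kd)))) letter)
    pvRefKey

-- ===== PORT B =====
-- one joker move: pop at i, reinsert at (i+shift-1)%53+1 (wrap lands it below the top)
def pvMoveJoker (deck : List Int) (joker : Int) (shift : Int) : List Int :=
  match PySem.List.index? deck joker with
  | none => deck   -- unreachable: jokers are always in the deck
  | some i =>
    match PySem.List.pop? deck (i : Int) with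
    | none => deck
    | some (_, d') =>
      let j := PySem.Int.mod ((i : Int) + shift - 1) 53 + 1
      PySem.List.insert d' j joker

def pvStepB (deck0 : List Int) (letter : Char) : List Int :=
  let deck := [((53 : Int), (1 : Int)), ((54 : Int), (2 : Int))].foldl
    (fun d js => pvMoveJoker d js.1 js.2) deck0
  let a := min ((PySem.List.index? deck 53).getD 0) ((PySem.List.index? deck 54).getD 0)
  let b := max ((PySem.List.index? deck 53).getD 0) ((PySem.List.index? deck 54).getD 0)
  let deck := PySem.List.slice deck (some ((b : Int) + 1)) none
    ++ PySem.List.slice deck (some (a : Int)) (some ((b : Int) + 1))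
    ++ PySem.List.slice deck none (some (a : Int))
  let n := min (PySem.List.pyGetD deck (-1) 0) 53
  let p := ((PySem.Chars.upperChar letter).toNat : Int) - 64
  let r := PySem.Int.mod (n + p) 53
  PySem.List.slice deck (some r) (some (-1)) ++ PySem.List.slice deck none (some r)
    ++ PySem.List.slice deck (some (-1)) none

def key_from_passphrase_alt (passphrase : String) : List Int :=
  passphrase.toList.foldl pvStepB pvRefKey

-- ===== PRECONDITION & SPEC =====
-- A asserts every character is an ASCII letter (AssertionError otherwise), so Pre_ admits exactly those strings
def Pre_key_from_passphrase (passphrase : String) : Prop :=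
  (passphrase.toList.all (fun c => ('a' ≤ c && c ≤ 'z') || ('A' ≤ c && c ≤ 'Z'))) = true
instance (passphrase : String) : Decidable (Pre_key_from_passphrase passphrase) := by
  unfold Pre_key_from_passphrase; infer_instance

def pvWitness_key_from_passphrase : String := "Aa"

def Spec_key_from_passphrase (passphrase : String) (out : List Int) : Prop := out = key_from_passphrase_alt passphrase
instance (passphrase : String) (out : List Int) : Decidable (Spec_key_from_passphrase passphrase out) := by unfold Spec_key_from_passphrase; infer_instance

-- ===== CLAIM (what is proved, stated in full; the proofs are below) =====
def Claim_equal_key_from_passphrase : Prop := ∀ (passphrase : String), Dom_key_from_passphrase passphrase → Pre_key_from_passphrase passphrase → Spec_key_from_passphrase passphrase (key_from_passphrase passphrase)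

-- ===== LEMMAS AND PROOFS =====

-- the 52 ASCII letters (proof-side abbreviation for the Pre_ list)
def pvLetters : List Char :=
  ['a','b','c','d','e','f','g','h','i','j','k','l','m','n','o','p','q','r','s','t','u','v','w','x','y','z',
   'A','B','C','D','E','F','G','H','I','J','K','L','M','N','O','P','Q','R','S','T','U','V','W','X','Y','Z']

theorem pvAlphaMem (c : Char) (h : (('a' ≤ c && c ≤ 'z') || ('A' ≤ c && c ≤ 'Z')) = true) :
    c ∈ pvLetters := by
  have hb : (97 ≤ c.toNat ∧ c.toNat ≤ 122) ∨ (65 ≤ c.toNat ∧ c.toNat ≤ 90) := by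
    simp only [Bool.or_eq_true, Bool.and_eq_true, decide_eq_true_eq, Char.le_def] at h
    rcases h with ⟨h1, h2⟩ | ⟨h1, h2⟩
    · left; exact ⟨by exact_mod_cast UInt32.le_iff_toNat_le.mp h1, by exact_mod_cast UInt32.le_iff_toNat_le.mp h2⟩
    · right; exact ⟨by exact_mod_cast UInt32.le_iff_toNat_le.mp h1, by exact_mod_cast UInt32.le_iff_toNat_le.mp h2⟩
  rw [← Char.ofNat_toNat c]
  rcases hb with ⟨h1, h2⟩ | ⟨h1, h2⟩ <;> interval_cases (c.toNat) <;> decide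

-- the middle (triple-cut) and final (fused count-cut) parts of pvStepB as named pieces
def pvTripleBexpr (deck : List Int) : List Int :=
  let a := min ((PySem.List.index? deck 53).getD 0) ((PySem.List.index? deck 54).getD 0)
  let b := max ((PySem.List.index? deck 53).getD 0) ((PySem.List.index? deck 54).getD 0)
  PySem.List.slice deck (some ((b : Int) + 1)) none
    ++ PySem.List.slice deck (some (a : Int)) (some ((b : Int) + 1))
    ++ PySem.List.slice deck none (some (a : Int))

def pvCutsBexpr (deck : List Int) (letter : Char) : List Int :=
  let n := min (PySem.List.pyGetD deck (-1) 0) 53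
  let p := ((PySem.Chars.upperChar letter).toNat : Int) - 64
  let r := PySem.Int.mod (n + p) 53
  PySem.List.slice deck (some r) (some (-1)) ++ PySem.List.slice deck none (some r)
    ++ PySem.List.slice deck (some (-1)) none

theorem pvStepB_decomp (d : List Int) (letter : Char) :
    pvStepB d letter = pvCutsBexpr (pvTripleBexpr (pvMoveJoker (pvMoveJoker d 53 1) 54 2)) letter := by
  simp only [pvStepB, pvTripleBexpr, pvCutsBexpr, List.foldl_cons, List.foldl_nil]

theorem pvEraseIdxAppend {α : Type} (l₁ l₂ : List α) (v : α) :
    (l₁ ++ v :: l₂).eraseIdx l₁.length = l₁ ++ l₂ := by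
  induction l₁ with
  | nil => simp
  | cons a t ih => simpa using ih

theorem pvGetDAppend (l₁ l₂ : List Int) (v : Int) :
    (l₁ ++ v :: l₂).getD l₁.length 0 = v := by
  simp [List.getD]

theorem pvPermFacts {d : List Int} (h : d.Perm pvRefKey) :
    d.length = 54 ∧ (53:Int) ∈ d ∧ (54:Int) ∈ d ∧ ∀ x ∈ d, 1 ≤ x ∧ x < 55 := by
  refine ⟨by rw [h.length_eq]; decide, h.mem_iff.2 (by decide), h.mem_iff.2 (by decide), ?_⟩
  intro x hx
  exact (PySem.List.mem_pyRange_one).1 (h.mem_iff.1 hx)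

theorem pvModSmall (i : Nat) (h : i < 53) : PySem.Int.mod ((i:Int)) 53 = (i:Int) := by
  rw [PySem.Int.mod_eq_emod_of_pos (by norm_num)]; omega

-- joker A: A's two slicing branches = B's pop/modular-reinsert move, and the move permutes the deck
theorem pvMoveAEq {d : List Int} (h : d.Perm pvRefKey) :
    pvAdvanceJokerA d = pvMoveJoker d 53 1 ∧ (pvMoveJoker d 53 1).Perm d := by
  obtain ⟨hlen, h53, _, _⟩ := pvPermFacts h
  obtain ⟨i, hi⟩ := Option.isSome_iff_exists.1 (PySem.List.index?_isSome_iff d 53 |>.2 h53)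
  obtain ⟨pre, suf, hd, hpre, -⟩ := PySem.List.index?_eq_some_iff d 53 i |>.1 hi
  have hlen' : pre.length + suf.length + 1 = 54 := by
    have := congrArg List.length hd; simp at this; omega
  have hilt : i < 54 := by omega
  have hpop : PySem.List.pop? d (i:Int) = some (d[i]'(by omega), d.eraseIdx i) :=
    PySem.List.pop?_natCast d i (by omega)
  have herase : d.eraseIdx i = pre ++ suf := by
    rw [hd, ← hpre]; exact pvEraseIdxAppend pre suf 53
  unfold pvAdvanceJokerA pvMoveJoker
  rw [hi]; dsimp only; rw [hpop]; dsimp only; rw [herase]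
  by_cases hc : i = 53
  · subst hc
    have hsuf : suf = [] := List.eq_nil_of_length_eq_zero (by omega)
    subst hsuf
    obtain ⟨p0, pre', rfl⟩ : ∃ p0 pre', pre = p0 :: pre' := by
      cases pre with
      | nil => simp at hpre
      | cons a t => exact ⟨a, t, rfl⟩
    have hd' : d = p0 :: (pre' ++ [53]) := by simpa using hd
    have hj : PySem.Int.mod (((53:Nat):Int) + 1 - 1) 53 + 1 = (1:Int) := by decide
    rw [if_pos rfl, hj, hd']
    have hpre' : pre'.length = 52 := by simpa using hpre
    have hins : PySem.List.insert (p0 :: pre') (1:Int) 53 = (p0 :: pre').take 1 ++ 53 :: (p0 :: pre').drop 1 :=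
      PySem.List.insert_ofNat (p0 :: pre') 1 53 (by simp)
    have hslice : PySem.List.slice (p0 :: (pre' ++ [53])) (some 1) (some 53)
        = pre' := by
      rw [PySem.List.slice_toNat (p0 :: (pre' ++ [53])) (by norm_num) (by norm_num)]
      norm_num
      rw [List.take_append_of_le_length (by omega), List.take_of_length_le (by omega)]
    simp only [List.append_nil]
    rw [hins, hslice]
    constructor
    · simp
    · refine List.Perm.cons p0 ?_
      simpa using (List.perm_append_singleton 53 pre').symm
  · have hilt' : i < 53 := by omega
    obtain ⟨y, ys, rfl⟩ : ∃ y ys, suf = y :: ys := by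
      cases suf with
      | nil => simp at hlen'; omega
      | cons a t => exact ⟨a, t, rfl⟩
    have hj : PySem.Int.mod ((i:Int) + 1 - 1) 53 + 1 = (((i+1:Nat)):Int) := by
      have : ((i:Int) + 1 - 1) = ((i:Nat):Int) := by ring
      rw [this, pvModSmall i hilt']; push_cast; ring
    rw [if_neg hc, hj]
    have hins : PySem.List.insert (pre ++ y :: ys) (((i+1:Nat)):Int) 53
        = (pre ++ y :: ys).take (i+1) ++ 53 :: (pre ++ y :: ys).drop (i+1) :=
      PySem.List.insert_natCast (pre ++ y :: ys) (i+1) 53 (by simp only [List.length_append, List.length_cons]; omega)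
    have htake : (pre ++ y :: ys).take (i+1) = pre ++ [y] := by
      have : pre ++ y :: ys = (pre ++ [y]) ++ ys := by simp
      rw [this, ← hpre]
      have : pre.length + 1 = (pre ++ [y]).length := by simp
      rw [this, List.take_left]
    have hdrop : (pre ++ y :: ys).drop (i+1) = ys := by
      have : pre ++ y :: ys = (pre ++ [y]) ++ ys := by simp
      rw [this, ← hpre]
      have : pre.length + 1 = (pre ++ [y]).length := by simp
      rw [this, List.drop_left]
    have hsl1 : PySem.List.slice d none (some (i:Int)) = pre := by
      rw [PySem.List.slice_to_natCast, hd, ← hpre, List.take_left]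
    have hsl2 : PySem.List.pyGetD d ((i:Int) + 1) 0 = y := by
      have hcast : ((i:Int) + 1) = (((i+1:Nat)):Int) := by push_cast; ring
      rw [hcast, PySem.List.pyGetD_natCast, hd]
      have : pre ++ 53 :: y :: ys = (pre ++ [53]) ++ y :: ys := by simp
      rw [this]
      have : i + 1 = (pre ++ [53]).length := by simp only [List.length_append, List.length_cons, List.length_nil]; omega
      rw [this, pvGetDAppend]
    have hsl3 : PySem.List.slice d (some ((i:Int) + 2)) none = ys := by
      have hcast : ((i:Int) + 2) = (((i+2:Nat)):Int) := by push_cast; ring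
      rw [hcast, PySem.List.slice_from_natCast, hd]
      have : pre ++ 53 :: y :: ys = (pre ++ 53 :: [y]) ++ ys := by simp
      rw [this]
      have : i + 2 = (pre ++ 53 :: [y]).length := by simp only [List.length_append, List.length_cons, List.length_nil]; omega
      rw [this, List.drop_left]
    rw [hsl1, hsl2, hsl3, hins, htake, hdrop]
    constructor
    · simp
    · rw [hd]
      have : pre ++ [y] ++ 53 :: ys = pre ++ (y :: 53 :: ys) := by simp
      rw [this]
      exact List.Perm.append_left pre (List.Perm.swap 53 y ys)

-- joker B: A's three slicing branches = B's pop/modular-reinsert move with shift 2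
theorem pvMoveBEq {d : List Int} (h : d.Perm pvRefKey) :
    pvAdvanceJokerB d = pvMoveJoker d 54 2 ∧ (pvMoveJoker d 54 2).Perm d := by
  obtain ⟨hlen, _, h54, _⟩ := pvPermFacts h
  obtain ⟨i, hi⟩ := Option.isSome_iff_exists.1 (PySem.List.index?_isSome_iff d 54 |>.2 h54)
  obtain ⟨pre, suf, hd, hpre, -⟩ := PySem.List.index?_eq_some_iff d 54 i |>.1 hi
  have hlen' : pre.length + suf.length + 1 = 54 := by
    have := congrArg List.length hd; simp at this; omega
  have hpop : PySem.List.pop? d (i:Int) = some (d[i]'(by omega), d.eraseIdx i) :=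
    PySem.List.pop?_natCast d i (by omega)
  have herase : d.eraseIdx i = pre ++ suf := by
    rw [hd, ← hpre]; exact pvEraseIdxAppend pre suf 54
  unfold pvAdvanceJokerB pvMoveJoker
  rw [hi]; dsimp only; rw [hpop]; dsimp only; rw [herase]
  by_cases hc : i = 53
  · subst hc
    have hsuf : suf = [] := List.eq_nil_of_length_eq_zero (by omega)
    subst hsuf
    have hj : PySem.Int.mod (((53:Nat):Int) + 2 - 1) 53 + 1 = (2:Int) := by decide
    rw [if_pos rfl, hj]
    have hins : PySem.List.insert pre (2:Int) 54 = pre.take 2 ++ 54 :: pre.drop 2 :=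
      PySem.List.insert_ofNat pre 2 54 (by omega)
    have hsl0 : PySem.List.slice d (some 0) (some 2) = pre.take 2 := by
      rw [PySem.List.slice_toNat d (by norm_num) (by norm_num)]
      norm_num
      rw [hd, List.take_append_of_le_length (by omega)]
      rfl
    have hsl1 : PySem.List.slice d (some 2) (some 53) = pre.drop 2 := by
      rw [PySem.List.slice_toNat d (by norm_num) (by norm_num)]
      norm_num
      rw [hd, List.drop_append_of_le_length (by omega)]
      rw [List.take_append_of_le_length (by simp only [List.length_drop]; omega),
          List.take_of_length_le (by simp only [List.length_drop]; omega)]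
      rfl
    simp only [List.append_nil]
    rw [hsl0, hsl1, hins]
    constructor
    · simp
    · rw [hd]
      have h2 : (pre.take 2 ++ 54 :: pre.drop 2).Perm (54 :: pre) := by
        have h3 := List.perm_middle (a := (54:Int)) (l₁ := pre.take 2) (l₂ := pre.drop 2)
        rwa [List.take_append_drop] at h3
      have h4 : (pre ++ [54]).Perm (54 :: pre) := by
        simpa using List.perm_middle (a := (54:Int)) (l₁ := pre) (l₂ := [])
      exact h2.trans h4.symm
  · by_cases hc2 : i = 52
    · subst hc2
      obtain ⟨z, hsuf⟩ : ∃ z, suf = [z] := by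
        cases suf with
        | nil => simp at hlen'; omega
        | cons a t =>
          cases t with
          | nil => exact ⟨a, rfl⟩
          | cons b u => simp at hlen'; omega
      subst hsuf
      obtain ⟨p0, pre', rfl⟩ : ∃ p0 pre', pre = p0 :: pre' := by
        cases pre with
        | nil => simp at hpre
        | cons a t => exact ⟨a, t, rfl⟩
      have hpre' : pre'.length = 51 := by simpa using hpre
      have hd' : d = p0 :: (pre' ++ 54 :: [z]) := by simpa using hd
      have hj : PySem.Int.mod (((52:Nat):Int) + 2 - 1) 53 + 1 = (1:Int) := by decide
      rw [if_neg hc, if_pos rfl, hj]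
      have hins : PySem.List.insert (p0 :: pre' ++ [z]) (1:Int) 54
          = (p0 :: pre' ++ [z]).take 1 ++ 54 :: (p0 :: pre' ++ [z]).drop 1 :=
        PySem.List.insert_ofNat (p0 :: pre' ++ [z]) 1 54 (by simp)
      have hg0 : PySem.List.pyGetD d 0 0 = p0 := by
        rw [hd']; exact PySem.List.pyGetD_zero_cons ..
      have hg53 : PySem.List.pyGetD d 53 0 = z := by
        rw [PySem.List.pyGetD_ofNat' d 53 0, hd']
        have : p0 :: (pre' ++ 54 :: [z]) = (p0 :: pre' ++ [54]) ++ z :: [] := by simp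
        rw [this]
        have h53 : (53:Nat) = (p0 :: pre' ++ [54]).length := by simp only [List.length_append, List.length_cons, List.length_nil]; omega
        rw [h53, pvGetDAppend]
      have hsl : PySem.List.slice d (some 1) (some 52) = pre' := by
        rw [PySem.List.slice_toNat d (by norm_num) (by norm_num)]
        norm_num
        rw [hd']
        show (pre' ++ 54 :: [z]).take 51 = pre'
        rw [List.take_append_of_le_length (by omega), List.take_of_length_le (by omega)]
      rw [hg0, hg53, hsl, hins]
      constructor
      · simp
      · rw [hd']
        have h1 : List.take 1 (p0 :: pre' ++ [z]) ++ 54 :: List.drop 1 (p0 :: pre' ++ [z])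
            = p0 :: (54 :: (pre' ++ [z])) := by simp
        rw [h1]
        exact List.Perm.cons p0 (List.perm_middle).symm
    · have hilt' : i < 52 := by omega
      obtain ⟨y, z, zs, rfl⟩ : ∃ y z zs, suf = y :: z :: zs := by
        cases suf with
        | nil => simp at hlen'; omega
        | cons a t =>
          cases t with
          | nil => simp at hlen'; omega
          | cons b u => exact ⟨a, b, u, rfl⟩
      have hj : PySem.Int.mod ((i:Int) + 2 - 1) 53 + 1 = (((i+2:Nat)):Int) := by
        have : ((i:Int) + 2 - 1) = (((i+1:Nat)):Int) := by push_cast; ring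
        rw [this, pvModSmall (i+1) (by omega)]; push_cast; ring
      rw [if_neg hc, if_neg hc2, hj]
      have hins : PySem.List.insert (pre ++ y :: z :: zs) (((i+2:Nat)):Int) 54
          = (pre ++ y :: z :: zs).take (i+2) ++ 54 :: (pre ++ y :: z :: zs).drop (i+2) :=
        PySem.List.insert_natCast (pre ++ y :: z :: zs) (i+2) 54 (by simp only [List.length_append, List.length_cons]; omega)
      have hsplit : pre ++ y :: z :: zs = (pre ++ y :: [z]) ++ zs := by simp
      have hlen2 : i + 2 = (pre ++ y :: [z]).length := by simp only [List.length_append, List.length_cons, List.length_nil]; omega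
      have htake : (pre ++ y :: z :: zs).take (i+2) = pre ++ y :: [z] := by
        rw [hsplit, hlen2, List.take_left]
      have hdrop : (pre ++ y :: z :: zs).drop (i+2) = zs := by
        rw [hsplit, hlen2, List.drop_left]
      have hsl1 : PySem.List.slice d none (some (i:Int)) = pre := by
        rw [PySem.List.slice_to_natCast, hd, ← hpre, List.take_left]
      have hsl2 : PySem.List.slice d (some ((i:Int)+1)) (some ((i:Int)+3)) = y :: [z] := by
        rw [PySem.List.slice_toNat d (by omega) (by omega), hd]
        have h1 : ((i:Int)+1).toNat = i+1 := by omega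
        have h3 : ((i:Int)+3).toNat = i+3 := by omega
        rw [h1, h3]
        have : pre ++ 54 :: y :: z :: zs = (pre ++ [54]) ++ (y :: [z]) ++ zs := by simp
        rw [this]
        have hL : i + 1 = ((pre ++ [54])).length := by simp only [List.length_append, List.length_cons, List.length_nil]; omega
        rw [List.append_assoc, hL, List.drop_left, ← hL,
            show i + 3 - (i+1) = 2 from by omega]
        simp
      have hsl3 : PySem.List.slice d (some ((i:Int)+3)) none = zs := by
        have hcast : ((i:Int) + 3) = (((i+3:Nat)):Int) := by push_cast; ring
        rw [hcast, PySem.List.slice_from_natCast, hd]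
        have : pre ++ 54 :: y :: z :: zs = (pre ++ 54 :: y :: [z]) ++ zs := by simp
        rw [this]
        have : i + 3 = (pre ++ 54 :: y :: [z]).length := by simp only [List.length_append, List.length_cons, List.length_nil]; omega
        rw [this, List.drop_left]
      rw [hsl1, hsl2, hsl3, hins, htake, hdrop]
      constructor
      · simp
      · rw [hd]
        have h1 : pre ++ y :: [z] ++ 54 :: zs = pre ++ (y :: z :: 54 :: zs) := by simp
        rw [h1]
        refine List.Perm.append_left pre ?_
        have h2 : y :: z :: 54 :: zs = [y, z] ++ 54 :: zs := by simp
        rw [h2]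
        exact List.perm_middle


theorem pvSortedPair (x y : Int) :
    PySem.List.sorted [x, y] (fun z => z) false = [min x y, max x y] := by
  by_cases hxy : y < x <;>
    simp [PySem.List.sorted_eq_foldl_insertBy, PySem.List.insertBy, hxy] <;> omega

theorem pvGetLast53 (body : List Int) (bot : Int) (hb : body.length = 53) :
    PySem.List.pyGetD (body ++ [bot]) 53 0 = bot := by
  rw [PySem.List.pyGetD_ofNat' (body ++ [bot]) 53 0]
  rw [show (53:Nat) = body.length from hb.symm]
  exact pvGetDAppend body [] bot

-- the triple-cut codes compute the same list on any deck (sorted pair = (min, max))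
theorem pvTripleEq (d : List Int) : pvTripleCut d = pvTripleBexpr d := by
  simp only [pvTripleCut, pvTripleBexpr]
  rw [pvSortedPair]
  rw [show PySem.List.pyGetD [min ((PySem.List.index? d 53).getD 0 : Int) ((PySem.List.index? d 54).getD 0 : Int),
        max ((PySem.List.index? d 53).getD 0 : Int) ((PySem.List.index? d 54).getD 0 : Int)] 0 0
      = min ((PySem.List.index? d 53).getD 0 : Int) ((PySem.List.index? d 54).getD 0 : Int)
    from PySem.List.pyGetD_zero_cons ..]
  rw [show PySem.List.pyGetD [min ((PySem.List.index? d 53).getD 0 : Int) ((PySem.List.index? d 54).getD 0 : Int),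
        max ((PySem.List.index? d 53).getD 0 : Int) ((PySem.List.index? d 54).getD 0 : Int)] 1 0
      = max ((PySem.List.index? d 53).getD 0 : Int) ((PySem.List.index? d 54).getD 0 : Int)
    from by simp [PySem.List.pyGetD_ofNat']]
  rw [show min ((PySem.List.index? d 53).getD 0 : Int) ((PySem.List.index? d 54).getD 0 : Int)
      = ((min ((PySem.List.index? d 53).getD 0) ((PySem.List.index? d 54).getD 0) : Nat) : Int) from by push_cast; omega]
  rw [show max ((PySem.List.index? d 53).getD 0 : Int) ((PySem.List.index? d 54).getD 0 : Int)
      = ((max ((PySem.List.index? d 53).getD 0) ((PySem.List.index? d 54).getD 0) : Nat) : Int) from by push_cast; omega]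

theorem pvRearrPerm (xs : List Int) (f s : Nat) (hfs : f ≤ s) :
    (xs.drop (s+1) ++ (xs.drop f).take (s+1-f) ++ xs.take f).Perm xs := by
  conv_rhs => rw [← List.take_append_drop f xs]
  conv_rhs => rw [← List.take_append_drop (s+1-f) (xs.drop f)]
  rw [List.drop_drop, show f + (s + 1 - f) = s + 1 from by omega]
  rw [List.perm_iff_count]
  intro a
  simp only [List.count_append]
  omega

theorem pvTriplePerm {d : List Int} (_h : d.Perm pvRefKey) : (pvTripleBexpr d).Perm d := by
  simp only [pvTripleBexpr]
  set f := min ((PySem.List.index? d 53).getD 0) ((PySem.List.index? d 54).getD 0) with hf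
  set sx := max ((PySem.List.index? d 53).getD 0) ((PySem.List.index? d 54).getD 0) with hs
  have hfs : f ≤ sx := min_le_max
  rw [show ((sx:Int) + 1) = (((sx+1:Nat)):Int) from by push_cast; ring]
  rw [PySem.List.slice_from_natCast, PySem.List.slice_natCast, PySem.List.slice_to_natCast]
  exact pvRearrPerm d f sx hfs

-- letter value: A's uppercase .index + 1 = B's ord(upper) - 64, in [1, 26]
theorem pvLetterFacts (c : Char) (hc : c ∈ pvLetters) :
    pvLetterToNumber c = ((PySem.Chars.upperChar c).toNat : Int) - 64
    ∧ 1 ≤ pvLetterToNumber c ∧ pvLetterToNumber c ≤ 26 := by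
  fin_cases hc <;> exact ⟨by decide, by decide, by decide⟩

-- one count cut with 1-indexed cut value k rotates the top 53 cards left by k, bottom fixed
theorem pvCutSlices (body : List Int) (bot : Int) (hb : body.length = 53) (k : Int)
    (h0 : 0 ≤ k) (h53 : k.toNat ≤ 53) :
    PySem.List.slice (body ++ [bot]) (some k) (some 53)
      ++ PySem.List.slice (body ++ [bot]) none (some k)
      ++ [bot]
    = body.rotate k.toNat ++ [bot] := by
  have hd1 : (body ++ [bot]).drop k.toNat = body.drop k.toNat ++ [bot] :=
    List.drop_append_of_le_length (by omega)
  have ht1 : (body.drop k.toNat ++ [bot]).take (53 - k.toNat) = body.drop k.toNat := by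
    rw [List.take_append_of_le_length (by simp only [List.length_drop]; omega),
        List.take_of_length_le (by simp only [List.length_drop]; omega)]
  have ht2 : (body ++ [bot]).take k.toNat = body.take k.toNat :=
    List.take_append_of_le_length (by omega)
  rw [PySem.List.slice_toNat _ h0 (by norm_num), PySem.List.slice_to _ h0]
  rw [show ((53:Int)).toNat = 53 from rfl, hd1, ht1, ht2]
  rw [List.rotate_eq_drop_append_take (by omega)]

-- the fused cut of B, written with the r:-1 / -1: slices, is the same rotation
theorem pvCutSlicesNeg (body : List Int) (bot : Int) (hb : body.length = 53) (r : Int)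
    (h0 : 0 ≤ r) (hlt : r.toNat < 53) :
    PySem.List.slice (body ++ [bot]) (some r) (some (-1))
      ++ PySem.List.slice (body ++ [bot]) none (some r)
      ++ PySem.List.slice (body ++ [bot]) (some (-1)) none
    = body.rotate r.toNat ++ [bot] := by
  have hlen : (body ++ [bot]).length = 54 := by simp [hb]
  have hs3 : PySem.List.slice (body ++ [bot]) (some (-1)) none = [bot] := by
    rw [PySem.List.slice_from_neg_one, hlen]
    rw [show (54 - 1 : Nat) = body.length from by omega, List.drop_left]
  have hs1 : PySem.List.slice (body ++ [bot]) (some r) (some (-1)) = body.drop r.toNat := by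
    rw [show r = ((r.toNat : Nat) : Int) from by omega]
    simp only [PySem.List.slice]
    simp only [PySem.List.clampIdx_neg_one, PySem.List.clampIdx_natCast]
    rw [hlen, min_eq_left (by omega)]
    rw [List.drop_append_of_le_length (by omega)]
    rw [List.take_append_of_le_length (by simp only [List.length_drop]; omega),
        List.take_of_length_le (by simp only [List.length_drop]; omega)]
    rfl
  have hs2 : PySem.List.slice (body ++ [bot]) none (some r) = body.take r.toNat := by
    rw [PySem.List.slice_to _ h0, List.take_append_of_le_length (by omega)]
  rw [hs1, hs2, hs3, List.rotate_eq_drop_append_take (by omega)]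

-- A's two successive count cuts = B's one fused rotation, and the deck is only permuted
theorem pvCutsEq {d : List Int} (h : d.Perm pvRefKey) (letter : Char) (hc : letter ∈ pvLetters) :
    pvCountCutFromLetter (pvCountCut d) letter = pvCutsBexpr d letter
    ∧ (pvCountCutFromLetter (pvCountCut d) letter).Perm d := by
  obtain ⟨hlen, -, -, hbnd⟩ := pvPermFacts h
  have hne : d ≠ [] := by intro e; rw [e] at hlen; simp at hlen
  have hdecomp : d = d.dropLast ++ [d.getLast hne] := (List.dropLast_append_getLast hne).symm
  set body := d.dropLast with hbody
  set bot := d.getLast hne with hbot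
  have hblen : body.length = 53 := by rw [hbody]; simp [hlen]
  obtain ⟨hb1, hb2⟩ := hbnd bot (List.getLast_mem hne)
  obtain ⟨hLv, hp1, hp2⟩ := pvLetterFacts letter hc
  set p := pvLetterToNumber letter with hpdef
  -- the cut value used by A's count_cut, = min bot 53
  set bv : Int := if bot = 54 then (53:Int) else bot with hbv
  have hbv1 : 1 ≤ bv := by rw [hbv]; split <;> omega
  have hbv53 : bv ≤ 53 := by rw [hbv]; split <;> omega
  have hcc : pvCountCut d = body.rotate bv.toNat ++ [bot] := by
    simp only [pvCountCut]
    rw [hdecomp, pvGetLast53 body bot hblen, ← hbv]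
    exact pvCutSlices body bot hblen bv (by omega) (by omega)
  have hccl : pvCountCutFromLetter (pvCountCut d) letter
      = (body.rotate bv.toNat).rotate p.toNat ++ [bot] := by
    simp only [pvCountCutFromLetter, hcc, ← hpdef]
    rw [pvGetLast53 (body.rotate bv.toNat) bot (by simp [hblen])]
    exact pvCutSlices (body.rotate bv.toNat) bot (by simp [hblen]) p (by omega) (by omega)
  have hmin : min (PySem.List.pyGetD d (-1) 0) 53 = bv := by
    rw [PySem.List.pyGetD_neg_one (h := hne), ← hbot, hbv]
    split <;> omega
  have hB : pvCutsBexpr d letter = body.rotate ((PySem.Int.mod (bv + p) 53).toNat) ++ [bot] := by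
    simp only [pvCutsBexpr]
    rw [hmin, ← hLv]
    rw [hdecomp]
    exact pvCutSlicesNeg body bot hblen _ (PySem.Int.mod_nonneg _ (by norm_num))
      (by have := PySem.Int.mod_lt (bv + p) (b := 53) (by norm_num)
          have := PySem.Int.mod_nonneg (bv + p) (b := 53) (by norm_num)
          omega)
  have hrot : (body.rotate bv.toNat).rotate p.toNat
      = body.rotate ((PySem.Int.mod (bv + p) 53).toNat) := by
    rw [List.rotate_rotate]
    have hm : PySem.Int.mod (bv + p) 53 = (bv + p) % 53 :=
      PySem.Int.mod_eq_emod_of_pos (by norm_num)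
    have htn : ((PySem.Int.mod (bv + p) 53).toNat) = (bv.toNat + p.toNat) % 53 := by
      rw [hm]; omega
    rw [htn, ← hblen, List.rotate_mod]
  constructor
  · rw [hccl, hB, hrot]
  · rw [hccl, hdecomp]
    exact ((List.rotate_perm _ _).trans (List.rotate_perm _ _)).append_right [bot]

-- the full per-letter transform: A's five steps = B's three fused steps, deck stays a permutation
theorem pvStepA_eq (deck : List Int) (letter : Char)
    (h : deck.Perm pvRefKey)
    (hc : letter ∈ (['a','b','c','d','e','f','g','h','i','j','k','l','m','n','o','p','q','r','s','t','u','v','w','x','y','z',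
          'A','B','C','D','E','F','G','H','I','J','K','L','M','N','O','P','Q','R','S','T','U','V','W','X','Y','Z'] : List Char)) :
    pvCountCutFromLetter (pvCountCut (pvTripleCut (pvAdvanceJokerB (pvAdvanceJokerA deck)))) letter
      = pvStepB deck letter
    ∧ (pvCountCutFromLetter (pvCountCut (pvTripleCut (pvAdvanceJokerB (pvAdvanceJokerA deck)))) letter).Perm pvRefKey := by
  have hc' : letter ∈ pvLetters := hc
  obtain ⟨hA, hpA⟩ := pvMoveAEq h
  have h1 : (pvMoveJoker deck 53 1).Perm pvRefKey := hpA.trans h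
  obtain ⟨hB, hpB⟩ := pvMoveBEq h1
  have h2 : (pvMoveJoker (pvMoveJoker deck 53 1) 54 2).Perm pvRefKey := hpB.trans h1
  rw [hA, hB]
  have hT := pvTripleEq (pvMoveJoker (pvMoveJoker deck 53 1) 54 2)
  rw [hT]
  have hTp : (pvTripleBexpr (pvMoveJoker (pvMoveJoker deck 53 1) 54 2)).Perm pvRefKey :=
    (pvTriplePerm h2).trans h2
  obtain ⟨hC, hCp⟩ := pvCutsEq hTp letter hc'
  exact ⟨hC.trans (pvStepB_decomp deck letter).symm, hCp.trans hTp⟩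

-- ===== VERDICT (by name: the statement is the Claim_ definition above) =====
theorem key_from_passphrase_spec : Claim_equal_key_from_passphrase := by
  intro s _ hpre
  unfold Spec_key_from_passphrase key_from_passphrase key_from_passphrase_alt
  have : ∀ (cs : List Char) (d : List Int), (∀ c ∈ cs, c ∈ (['a','b','c','d','e','f','g','h','i','j','k','l','m','n','o','p','q','r','s','t','u','v','w','x','y','z',
          'A','B','C','D','E','F','G','H','I','J','K','L','M','N','O','P','Q','R','S','T','U','V','W','X','Y','Z'] : List Char)) → d.Perm pvRefKey →
      cs.foldl (fun kd letter =>
        pvCountCutFromLetter (pvCountCut (pvTripleCut (pvAdvanceJokerB (pvAdvanceJokerA kd)))) letter) d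
      = cs.foldl pvStepB d := by
    intro cs
    induction cs with
    | nil => intro d _ _; simp only [List.foldl_nil]
    | cons c cs ih =>
      intro d hall hperm
      obtain ⟨heq, hp⟩ := pvStepA_eq d c hperm (hall c (List.mem_cons_self ..))
      rw [heq] at hp
      simp only [List.foldl_cons, heq]
      exact ih (pvStepB d c) (fun x hx => hall x (List.mem_cons_of_mem _ hx)) hp
  exact this s.toList pvRefKey (fun c hc => pvAlphaMem c (List.all_eq_true.1 hpre c hc)) (List.Perm.refl _)
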